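-- pv_equiv track=rewrite | github.com/f-giacobbe/fondamenti1 | Esercitazione 8/verifica_presenza.py | verifica_presenza
-- ===== SOURCE A (Python) =====
-- def verifica_presenza(a,b):
--     v = []
--     somma = 0
--     for el in a:
--         somma += el
--
--         if el in b:
--             v.append(el)
--         else:
--             v.append(somma)
--
--     return v
-- ===== SOURCE B (Python) =====
-- def verifica_presenza(a, b):
--     # pass 1: materialize prefix sums
--     prefix = []
--     tot = 0
--     for el in a:
--         tot += el
--         prefix.append(tot)
--     # pass 2: select element or its prefix sum
--     return [el if el in b else s for el, s in zip(a, prefix)]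
-- ===== Notes on version B (the rewrite author's own statement) =====
-- stated objective: alternative
-- what changed: Replaces the single fused loop (running sum + conditional append) by two phases: a first pass materializing the prefix-sum table, then a zip-based selection pass choosing the element or its prefix sum.
import Mathlib
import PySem

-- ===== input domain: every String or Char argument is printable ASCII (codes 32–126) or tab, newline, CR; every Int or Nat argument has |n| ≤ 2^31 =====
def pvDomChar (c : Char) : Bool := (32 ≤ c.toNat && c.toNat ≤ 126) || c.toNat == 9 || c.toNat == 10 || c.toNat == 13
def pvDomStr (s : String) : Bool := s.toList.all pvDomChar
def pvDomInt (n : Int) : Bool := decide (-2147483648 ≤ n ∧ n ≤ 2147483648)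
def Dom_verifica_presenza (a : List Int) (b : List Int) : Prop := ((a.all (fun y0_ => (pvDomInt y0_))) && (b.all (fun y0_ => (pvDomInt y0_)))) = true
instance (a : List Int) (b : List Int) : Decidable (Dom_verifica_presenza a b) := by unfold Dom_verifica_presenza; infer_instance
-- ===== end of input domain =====

-- B replaces A's single fused loop by two phases: materialize the prefix-sum table, then a zip-based selection pass (alternative decomposition, same cost).

-- ===== PORT A =====
-- fused loop: state (somma, v); append el when el ∈ b else the running sum
def verifica_presenza (a : List Int) (b : List Int) : List Int :=
  (a.foldl (fun (st : Int × List Int) el =>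
      let somma := st.1 + el
      (somma, st.2 ++ [if b.contains el then el else somma]))
    (0, [])).2

-- ===== PORT B =====
-- pass 1 of Source B: build the materialized prefix-sum list
def vpPrefix (a : List Int) : List Int :=
  (a.foldl (fun (st : Int × List Int) el => (st.1 + el, st.2 ++ [st.1 + el])) (0, [])).2

-- pass 2 of Source B: zip a with the prefix table and select
def verifica_presenza_alt (a : List Int) (b : List Int) : List Int :=
  (a.zip (vpPrefix a)).map (fun p => if b.contains p.1 then p.1 else p.2)

-- ===== PRECONDITION & SPEC =====
def Spec_verifica_presenza (a : List Int) (b : List Int) (out : List Int) : Prop := out = verifica_presenza_alt a b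
instance (a : List Int) (b : List Int) (out : List Int) : Decidable (Spec_verifica_presenza a b out) := by unfold Spec_verifica_presenza; infer_instance

-- ===== CLAIM (what is proved, stated in full; the proofs are below) =====
def Claim_equal_verifica_presenza : Prop := ∀ (a : List Int) (b : List Int), Dom_verifica_presenza a b → Spec_verifica_presenza a b (verifica_presenza a b)

-- ===== LEMMAS AND PROOFS =====

-- reference recursion: the value both programs compute
def vpRef (a b : List Int) (s : Int) : List Int :=
  match a with
  | [] => []
  | el :: rest => (if b.contains el then el else s + el) :: vpRef rest b (s + el)

-- raw prefix-sum recursion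
def vpPre (a : List Int) (s : Int) : List Int :=
  match a with
  | [] => []
  | el :: rest => (s + el) :: vpPre rest (s + el)

theorem vpA_loop (a b : List Int) (s : Int) (v : List Int) :
    (a.foldl (fun (st : Int × List Int) el =>
        let somma := st.1 + el
        (somma, st.2 ++ [if b.contains el then el else somma])) (s, v)).2
      = v ++ vpRef a b s := by
  induction a generalizing s v with
  | nil => simp [vpRef]
  | cons el rest ih =>
      exact (ih (s + el) (v ++ [if b.contains el then el else s + el])).trans (by simp [vpRef])

theorem vpPrefix_loop (a : List Int) (s : Int) (v : List Int) :
    (a.foldl (fun (st : Int × List Int) el => (st.1 + el, st.2 ++ [st.1 + el])) (s, v)).2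
      = v ++ vpPre a s := by
  induction a generalizing s v with
  | nil => simp [vpPre]
  | cons el rest ih =>
      exact (ih (s + el) (v ++ [s + el])).trans (by simp [vpPre])

theorem vpB_zip (a b : List Int) (s : Int) :
    (a.zip (vpPre a s)).map (fun p => if b.contains p.1 then p.1 else p.2)
      = vpRef a b s := by
  induction a generalizing s with
  | nil => simp [vpPre, vpRef]
  | cons el rest ih =>
      simp only [vpPre, vpRef, List.zip_cons_cons, List.map_cons]
      rw [ih]

-- ===== VERDICT (by name: the statement is the Claim_ definition above) =====
theorem verifica_presenza_spec : Claim_equal_verifica_presenza := by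
  intro a b _
  unfold Spec_verifica_presenza verifica_presenza verifica_presenza_alt vpPrefix
  rw [vpA_loop, vpPrefix_loop, List.nil_append, List.nil_append, vpB_zip]
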